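-- pv_equiv track=rewrite | github.com/AdamZhouSE/pythonHomework | Code/CodeRecords/2793/60675/284929.py | func
-- ===== SOURCE A (Python) =====
-- def func(l: list, c:int) -> int:
--     if c == 0:
--         return 0
--     cnt = 1
--     for i in range(len(l)-1):
--         if l[i+1] - l[i] <= c :
--             cnt += 1
--         else:
--             cnt = 1
--     return cnt
-- ===== SOURCE B (Python) =====
-- def func(l: list, c: int) -> int:
--     if c == 0:
--         return 0
--     cnt = 1
--     i = len(l) - 1
--     while i >= 1 and l[i] - l[i - 1] <= c:
--         cnt += 1
--         i -= 1
--     return cnt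
-- ===== Notes on version B (the rewrite author's own statement) =====
-- stated objective: alternative
-- what changed: Replaces A's full forward sweep with reset-on-break by a backward walk from the end of the list that counts the trailing run and stops at the first gap larger than c.
import Mathlib
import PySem

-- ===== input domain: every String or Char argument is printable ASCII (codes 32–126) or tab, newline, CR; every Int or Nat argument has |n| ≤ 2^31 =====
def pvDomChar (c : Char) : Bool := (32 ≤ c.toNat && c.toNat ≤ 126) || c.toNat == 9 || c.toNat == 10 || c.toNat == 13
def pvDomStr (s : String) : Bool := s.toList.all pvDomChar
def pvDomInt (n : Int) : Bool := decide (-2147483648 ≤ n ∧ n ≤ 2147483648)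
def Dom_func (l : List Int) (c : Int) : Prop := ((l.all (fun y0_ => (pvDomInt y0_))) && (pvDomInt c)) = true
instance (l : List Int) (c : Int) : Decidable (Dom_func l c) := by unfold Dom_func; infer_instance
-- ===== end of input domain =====

-- ===== PORT A =====
-- A: forward sweep over all adjacent pairs, resetting cnt to 1 at each gap > c.
def func (l : List Int) (c : Int) : Int :=
  if c = 0 then 0
  else
    (List.range (l.length - 1)).foldl
      (fun cnt i => if l.getD (i + 1) 0 - l.getD i 0 ≤ c then cnt + 1 else 1) 1

-- ===== PORT B =====
-- B: walk backwards from the end (reversed list), counting while the gap is ≤ c, stop at the first larger gap.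
def funcAltGo (c : Int) : List Int → Int
  | x :: y :: rest => if x - y ≤ c then 1 + funcAltGo c (y :: rest) else 1
  | _ => 1

def func_alt (l : List Int) (c : Int) : Int :=
  if c = 0 then 0 else funcAltGo c l.reverse

-- ===== PRECONDITION & SPEC =====
def Spec_func (l : List Int) (c : Int) (out : Int) : Prop := out = func_alt l c
instance (l : List Int) (c : Int) (out : Int) : Decidable (Spec_func l c out) := by unfold Spec_func; infer_instance

-- ===== CLAIM (what is proved, stated in full; the proofs are below) =====
def Claim_equal_func : Prop := ∀ (l : List Int) (c : Int), Dom_func l c → Spec_func l c (func l c)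

-- ===== LEMMAS AND PROOFS =====

theorem func_core_eq (c : Int) (l : List Int) :
    (List.range (l.length - 1)).foldl
      (fun cnt i => if l.getD (i + 1) 0 - l.getD i 0 ≤ c then cnt + 1 else 1) 1
      = funcAltGo c l.reverse := by
  induction l using List.reverseRecOn with
  | nil => simp [funcAltGo]
  | append_singleton xs a ih =>
    cases hxs : xs.reverse with
    | nil =>
      have : xs = [] := by simpa using congrArg List.reverse hxs
      subst this
      simp [funcAltGo]
    | cons b rest =>
      have hxsne : xs ≠ [] := by
        intro h; subst h; simp at hxs
      have hpos : 0 < xs.length := List.length_pos_of_ne_nil hxsne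
      have hlen : xs.length - 1 + 1 = xs.length := by omega
      have hrange : List.range ((xs ++ [a]).length - 1)
          = List.range (xs.length - 1) ++ [xs.length - 1] := by
        have : (xs ++ [a]).length - 1 = xs.length := by simp
        rw [this, ← hlen, List.range_succ, hlen]
      have hget : ∀ i, i < xs.length → (xs ++ [a]).getD i 0 = xs.getD i 0 := by
        intro i hi
        exact List.getD_append _ _ _ _ hi
      have hxseq : xs = rest.reverse ++ [b] := by
        have := congrArg List.reverse hxs
        simpa using this
      have hb : xs.getD (xs.length - 1) 0 = b := by
        rw [hxseq]
        rw [show (rest.reverse ++ [b]).length - 1 = rest.reverse.length by simp]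
        rw [List.getD_append_right _ _ _ _ (le_refl _)]
        simp
      have hgetA : (xs ++ [a]).getD xs.length 0 = a := by
        rw [List.getD_append_right _ _ _ _ (le_refl _)]
        simp
      have hfold_agree :
          (List.range (xs.length - 1)).foldl
            (fun cnt i => if (xs ++ [a]).getD (i + 1) 0 - (xs ++ [a]).getD i 0 ≤ c then cnt + 1 else 1) (1 : Int)
          = (List.range (xs.length - 1)).foldl
            (fun cnt i => if xs.getD (i + 1) 0 - xs.getD i 0 ≤ c then cnt + 1 else 1) (1 : Int) := by
        apply PySem.List.foldl_congr_mem
        intro cnt i hi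
        have hi' : i < xs.length - 1 := List.mem_range.mp hi
        rw [hget i (by omega), hget (i + 1) (by omega)]
      have hgo : funcAltGo c ((xs ++ [a]).reverse)
          = if a - b ≤ c then 1 + funcAltGo c xs.reverse else 1 := by
        rw [List.reverse_append, hxs]
        rfl
      rw [hrange, List.foldl_append]
      simp only [List.foldl_cons, List.foldl_nil]
      rw [hfold_agree, ih, hgo, hlen, hgetA, hget (xs.length - 1) (by omega), hb]
      split_ifs <;> omega

-- ===== VERDICT (by name: the statement is the Claim_ definition above) =====
theorem func_spec : Claim_equal_func := by
  intro l c _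
  unfold Spec_func func func_alt
  split_ifs with h
  · rfl
  · exact func_core_eq c l
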